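-- pv_equiv track=rewrite | github.com/wyk18703232953/myResearch | codeComplex/data/onlyCode/python/cubic/python_cubic_0437.py | solve
-- ===== SOURCE A (Python) =====
-- def solve(node, remain, adj, dp, n, m):
--   if remain == 0:
--     return 0
--
--   key = (node + remain * n * m)
--   mem = dp[key]
--   if mem != -1:
--     return mem
--
--   ans = min(map(lambda x: solve(x[0], remain-1,
--             adj, dp, n, m) + x[1], adj[node]))
--   dp[key] = ans
--   return ans
-- ===== SOURCE B (Python) =====
-- def solve(node, remain, adj, dp, n, m):
--     # Bottom-up DP over levels instead of memoized recursion; does not mutate dp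
--     # (A writes computed answers into dp in place; only the return value is matched).
--     if remain == 0:
--         return 0
--     nm = n * m
--     mem = dp[node + remain * nm]
--     if mem != -1:
--         return mem
--     prev = [0] * len(adj)
--     for k in range(remain):
--         r = k + 1
--         cur = []
--         for v in range(len(adj)):
--             mem = dp[v + r * nm]
--             if mem != -1:
--                 cur.append(mem)
--             else:
--                 vals = [prev[e[0]] + e[1] for e in adj[v]]
--                 cur.append(min(vals))
--         prev = cur
--     return prev[node]
-- ===== Notes on version B (the rewrite author's own statement) =====
-- stated objective: alternative
-- what changed: Replaced A's memoized top-down recursion that writes answers into dp in place by an iterative bottom-up dynamic program (one level table per remaining-step count, plus a memo lookup for the queried state) that never mutates dp; only the return value is matched.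
-- outside the precondition, e.g. on solve(0, 1, [[(1, 3)], []], [-1, -1, -1, -1], 2, 1): A returns 3, B raises ValueError; on solve(0, 3, [[(1, 0), (0, 0)], [(1, 1)]], [-1, -1, -1, -1, -1], 1, 1): A returns 1, B returns 0
import Mathlib
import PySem

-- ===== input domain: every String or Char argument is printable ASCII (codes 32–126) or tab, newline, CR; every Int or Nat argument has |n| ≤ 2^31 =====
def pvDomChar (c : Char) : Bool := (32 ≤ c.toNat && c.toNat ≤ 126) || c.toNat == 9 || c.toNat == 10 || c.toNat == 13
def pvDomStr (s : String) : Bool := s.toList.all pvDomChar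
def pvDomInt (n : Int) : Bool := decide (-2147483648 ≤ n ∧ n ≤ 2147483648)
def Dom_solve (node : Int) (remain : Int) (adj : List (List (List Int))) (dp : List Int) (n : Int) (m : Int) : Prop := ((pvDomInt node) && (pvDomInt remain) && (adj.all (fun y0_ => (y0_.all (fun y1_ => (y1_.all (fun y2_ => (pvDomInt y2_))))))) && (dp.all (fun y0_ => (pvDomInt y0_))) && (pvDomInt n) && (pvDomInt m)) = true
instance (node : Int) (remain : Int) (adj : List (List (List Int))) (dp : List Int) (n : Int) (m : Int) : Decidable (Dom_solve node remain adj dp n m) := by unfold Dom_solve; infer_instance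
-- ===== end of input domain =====

-- B replaces A's memoized top-down recursion (which writes into dp in place) by an
-- iterative bottom-up level-by-level table; only the RETURN value is matched — B does
-- not perform A's in-place writes into dp.

-- ===== PORT A =====
-- port of Python's min() over a nonempty list of ints
def pyMinList (l : List Int) : Int :=
  match l with
  | [] => 0      -- Python raises ValueError here; unreachable under Pre_solve
  | h :: t => t.foldl min h

-- the recursion of A, with dp threaded as state and fuel = remain.toNat;
-- fuel 0 means remain ≤ 0: Python returns 0 when remain == 0 (negative remain is outside Pre_solve)
def solveGo (adj : List (List (List Int))) (n : Int) (m : Int) :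
    Nat → Int → Int → List Int → (Int × List Int)
  | fuel, node, remain, dp =>
    if remain = 0 then (0, dp)
    else
      let key := node + remain * n * m
      let mem := (PySem.List.pyGet? dp key).getD 0   -- IndexError excluded by Pre_solve
      if mem ≠ -1 then (mem, dp)
      else
        match fuel with
        | 0 => (0, dp)      -- fuel exhausted: unreachable under Pre_solve
        | Nat.succ fuel' =>
          let st := ((PySem.List.pyGet? adj node).getD []).foldl
            (fun (acc : List Int × List Int) e =>
              let sub := solveGo adj n m fuel' ((PySem.List.pyGet? e 0).getD 0) (remain - 1) acc.2
              (acc.1 ++ [sub.1 + (PySem.List.pyGet? e 1).getD 0], sub.2))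
            ([], dp)
          let ans := pyMinList st.1
          (ans, PySem.List.pySetD st.2 key ans)

def solve (node : Int) (remain : Int) (adj : List (List (List Int))) (dp : List Int) (n : Int) (m : Int) : Int :=
  (solveGo adj n m remain.toNat node remain dp).1

-- ===== PORT B =====
def solve_alt (node : Int) (remain : Int) (adj : List (List (List Int))) (dp : List Int) (n : Int) (m : Int) : Int :=
  if remain = 0 then 0
  else
    let nm := n * m
    let mem0 := (PySem.List.pyGet? dp (node + remain * nm)).getD 0
    if mem0 ≠ -1 then mem0
    else
    let prev0 : List Int := List.replicate adj.length (0 : Int)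
    let prev := (List.range remain.toNat).foldl
      (fun prev (k : Nat) =>
        let r : Int := (k : Int) + 1
        (List.range adj.length).map (fun (v : Nat) =>
          let mem := (PySem.List.pyGet? dp ((v : Int) + r * nm)).getD 0
          if mem ≠ -1 then mem
          else pyMinList ((adj.getD v []).map (fun e =>
            (PySem.List.pyGet? prev ((PySem.List.pyGet? e 0).getD 0)).getD 0
              + (PySem.List.pyGet? e 1).getD 0))))
      prev0
    (PySem.List.pyGet? prev node).getD 0

-- ===== PRECONDITION & SPEC =====
-- every adjacency row is nonempty and each edge [to, w] has length ≥ 2 with a valid target node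
def RowsOk (adj : List (List (List Int))) : Prop :=
  ∀ row ∈ adj, row ≠ [] ∧ ∀ e ∈ row, 2 ≤ e.length ∧ 0 ≤ e.headD 0 ∧ e.headD 0 < (adj.length : Int)

-- Pre_ admits remain == 0, a memoized hit at the queried state itself, and fully valid
-- instances; it excludes (a) inputs on which A raises (negative remain, node/edge/dp indices
-- out of range, an empty adjacency row reached by the recursion, min() on empty), and (b) inputs
-- whose dp key encoding is non-injective (len(adj) > n*m) or whose rows off the queried
-- path are invalid/empty: there A's value can hinge on accidental memo-slot collisions and
-- on which states its recursion happens to visit, while the natural bottom-up B raises or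
-- computes the collision-free answer.
def Pre_solve (node : Int) (remain : Int) (adj : List (List (List Int))) (dp : List Int) (n : Int) (m : Int) : Prop :=
  remain = 0 ∨
  (remain ≠ 0 ∧ -(dp.length : Int) ≤ node + remain * (n * m) ∧ node + remain * (n * m) < (dp.length : Int) ∧
   (PySem.List.pyGet? dp (node + remain * (n * m))).getD 0 ≠ -1) ∨
  (1 ≤ remain ∧ 0 ≤ node ∧ node < (adj.length : Int) ∧
   (adj.length : Int) ≤ n * m ∧
   ((adj.length : Int) - 1) + remain * (n * m) < (dp.length : Int) ∧
   RowsOk adj)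

instance (node : Int) (remain : Int) (adj : List (List (List Int))) (dp : List Int) (n : Int) (m : Int) : Decidable (Pre_solve node remain adj dp n m) := by
  unfold Pre_solve RowsOk; infer_instance

def pvWitness_solve : Int × Int × List (List (List Int)) × List Int × Int × Int :=
  (0, 1, [[[0, 2]]], [-1, -1], 1, 1)

def Spec_solve (node : Int) (remain : Int) (adj : List (List (List Int))) (dp : List Int) (n : Int) (m : Int) (out : Int) : Prop := out = solve_alt node remain adj dp n m
instance (node : Int) (remain : Int) (adj : List (List (List Int))) (dp : List Int) (n : Int) (m : Int) (out : Int) : Decidable (Spec_solve node remain adj dp n m out) := by unfold Spec_solve; infer_instance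

-- ===== CLAIM (what is proved, stated in full; the proofs are below) =====
def Claim_equal_solve : Prop := ∀ (node : Int) (remain : Int) (adj : List (List (List Int))) (dp : List Int) (n : Int) (m : Int), Dom_solve node remain adj dp n m → Pre_solve node remain adj dp n m → Spec_solve node remain adj dp n m (solve node remain adj dp n m)

-- ===== LEMMAS AND PROOFS =====

-- the mathematical value both ports compute: level-r answer at node v, reading the ORIGINAL dp
def specF (adj : List (List (List Int))) (dp : List Int) (nm : Int) : Nat → Nat → Int
  | 0, _ => 0
  | Nat.succ r, v =>
    if (PySem.List.pyGet? dp ((v : Int) + ((r : Int) + 1) * nm)).getD 0 ≠ -1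
    then (PySem.List.pyGet? dp ((v : Int) + ((r : Int) + 1) * nm)).getD 0
    else pyMinList ((adj.getD v []).map (fun e =>
      specF adj dp nm r ((PySem.List.pyGet? e 0).getD 0).toNat + (PySem.List.pyGet? e 1).getD 0))

-- invariant of A's memo table: each state slot holds its original value or the spec value
def MemoInv (adj : List (List (List Int))) (dp0 : List Int) (nm : Int) (dp : List Int) : Prop :=
  dp.length = dp0.length ∧
  ∀ (r v : Nat), 1 ≤ r → v < adj.length →
    PySem.List.pyGet? dp ((v : Int) + (r : Int) * nm) = PySem.List.pyGet? dp0 ((v : Int) + (r : Int) * nm) ∨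
    (PySem.List.pyGet? dp0 ((v : Int) + (r : Int) * nm) = some (-1) ∧
     PySem.List.pyGet? dp ((v : Int) + (r : Int) * nm) = some (specF adj dp0 nm r v))

lemma key_inj {V nm : Int} (hV : V ≤ nm) {r r' v v' : Nat}
    (hv : (v : Int) < V) (hv' : (v' : Int) < V)
    (h : (v : Int) + (r : Int) * nm = (v' : Int) + (r' : Int) * nm) : v = v' ∧ r = r' := by
  have h0v : (0:Int) ≤ (v : Int) := Int.natCast_nonneg v
  have h0v' : (0:Int) ≤ (v' : Int) := Int.natCast_nonneg v'
  have hnm : (0:Int) < nm := lt_of_lt_of_le (lt_of_le_of_lt h0v hv) hV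
  have hre : (r : Int) = (r' : Int) := by
    rcases lt_trichotomy (r : Int) (r' : Int) with hlt | heq | hgt
    · exfalso
      have h1 : (1:Int) ≤ (r' : Int) - (r : Int) := by omega
      have h2 : nm ≤ ((r' : Int) - (r : Int)) * nm := le_mul_of_one_le_left (le_of_lt hnm) h1
      have hh : (v : Int) - (v' : Int) = ((r' : Int) - (r : Int)) * nm := by linear_combination h
      linarith
    · exact heq
    · exfalso
      have h1 : (1:Int) ≤ (r : Int) - (r' : Int) := by omega
      have h2 : nm ≤ ((r : Int) - (r' : Int)) * nm := le_mul_of_one_le_left (le_of_lt hnm) h1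
      have hh : (v' : Int) - (v : Int) = ((r : Int) - (r' : Int)) * nm := by linear_combination h.symm
      linarith
  constructor
  · have : (v : Int) = (v' : Int) := by rw [hre] at h; linarith
    exact_mod_cast this
  · exact_mod_cast hre

lemma pyGet0_headD (e : List Int) (h : e ≠ []) :
    (PySem.List.pyGet? e 0).getD 0 = e.headD 0 := by
  cases e with
  | nil => exact absurd rfl h
  | cons a t => rw [PySem.List.pyGet?_zero_cons]; rfl

lemma pyGet?_setD_ne (xs : List Int) (i j : Int) (hi : 0 ≤ i) (hj : 0 ≤ j) (hne : i ≠ j) (a : Int) :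
    PySem.List.pyGet? (PySem.List.pySetD xs i a) j = PySem.List.pyGet? xs j := by
  rw [PySem.List.pySetD_of_nonneg _ _ hi, PySem.List.pyGet?_of_nonneg _ hj,
      PySem.List.pyGet?_of_nonneg _ hj, List.getElem?_set]
  rw [if_neg (by omega)]

lemma pyGet?_setD_self (xs : List Int) (i : Int) (hi : 0 ≤ i) (hlen : i.toNat < xs.length) (a : Int) :
    PySem.List.pyGet? (PySem.List.pySetD xs i a) i = some a := by
  rw [PySem.List.pySetD_of_nonneg _ _ hi, PySem.List.pyGet?_of_nonneg _ hi, List.getElem?_set]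
  simp [hlen]

lemma MemoInv_write (adj : List (List (List Int))) (dp0 : List Int) (nm : Int)
    (hV : (adj.length : Int) ≤ nm) {dp : List Int} (hInv : MemoInv adj dp0 nm dp)
    (r v : Nat) (_hr : 1 ≤ r) (hv : v < adj.length)
    (hOrig : PySem.List.pyGet? dp0 ((v : Int) + (r : Int) * nm) = some (-1)) :
    MemoInv adj dp0 nm
      (PySem.List.pySetD dp ((v : Int) + (r : Int) * nm) (specF adj dp0 nm r v)) := by
  have hnm : (0:Int) < nm := by
    have hp : 0 < adj.length := by omega
    have : (0:Int) < (adj.length : Int) := by exact_mod_cast hp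
    linarith
  have hK0 : (0:Int) ≤ (v : Int) + (r : Int) * nm := by
    have := Int.natCast_nonneg v
    have := mul_nonneg (Int.natCast_nonneg r) (le_of_lt hnm)
    linarith
  have hKlen : ((v : Int) + (r : Int) * nm).toNat < dp.length := by
    rw [PySem.List.pyGet?_of_nonneg _ hK0] at hOrig
    obtain ⟨hlt, -⟩ := List.getElem?_eq_some_iff.mp hOrig
    have := hInv.1
    omega
  unfold MemoInv
  constructor
  · rw [PySem.List.pySetD_of_nonneg _ _ hK0, List.length_set]; exact hInv.1
  · intro r' v' hr' hv'
    have hK0' : (0:Int) ≤ (v' : Int) + (r' : Int) * nm := by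
      have := Int.natCast_nonneg v'
      have := mul_nonneg (Int.natCast_nonneg r') (le_of_lt hnm)
      linarith
    by_cases hk : (v : Int) + (r : Int) * nm = (v' : Int) + (r' : Int) * nm
    · obtain ⟨hveq, hreq⟩ := key_inj hV (by exact_mod_cast hv) (by exact_mod_cast hv') hk
      subst hveq; subst hreq
      right
      exact ⟨hOrig, pyGet?_setD_self dp _ hK0 hKlen _⟩
    · rw [pyGet?_setD_ne dp _ _ hK0 hK0' hk]
      exact hInv.2 r' v' hr' hv'

lemma goA_fold (adj : List (List (List Int))) (n m : Int) (dp0 : List Int) (r : Nat)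
    (IH : ∀ v : Nat, v < adj.length → ∀ dp, MemoInv adj dp0 (n * m) dp →
      (solveGo adj n m r (v : Int) (r : Int) dp).1 = specF adj dp0 (n * m) r v ∧
      MemoInv adj dp0 (n * m) (solveGo adj n m r (v : Int) (r : Int) dp).2) :
    ∀ (l : List (List Int)),
      (∀ e ∈ l, 2 ≤ e.length ∧ 0 ≤ e.headD 0 ∧ e.headD 0 < (adj.length : Int)) →
      ∀ (acc : List Int) (dp : List Int), MemoInv adj dp0 (n * m) dp →
      (l.foldl
          (fun (acc : List Int × List Int) e =>
            (acc.1 ++ [(solveGo adj n m r ((PySem.List.pyGet? e 0).getD 0) ((r : Int)) acc.2).1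
                + (PySem.List.pyGet? e 1).getD 0],
             (solveGo adj n m r ((PySem.List.pyGet? e 0).getD 0) ((r : Int)) acc.2).2)) (acc, dp)).1
        = acc ++ l.map (fun e =>
            specF adj dp0 (n * m) r ((PySem.List.pyGet? e 0).getD 0).toNat
              + (PySem.List.pyGet? e 1).getD 0) ∧
      MemoInv adj dp0 (n * m)
        (l.foldl
          (fun (acc : List Int × List Int) e =>
            (acc.1 ++ [(solveGo adj n m r ((PySem.List.pyGet? e 0).getD 0) ((r : Int)) acc.2).1
                + (PySem.List.pyGet? e 1).getD 0],
             (solveGo adj n m r ((PySem.List.pyGet? e 0).getD 0) ((r : Int)) acc.2).2)) (acc, dp)).2 := by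
  intro l
  induction l with
  | nil =>
    intro _ acc dp hInv
    constructor
    · simp
    · simpa using hInv
  | cons e t ihl =>
    intro hok acc dp hInv
    obtain ⟨hlen2, h0le, hlt⟩ := hok e (List.mem_cons_self)
    have hne : e ≠ [] := by
      intro hcon; subst hcon; simp at hlen2
    have he0 : (PySem.List.pyGet? e 0).getD 0 = e.headD 0 := pyGet0_headD e hne
    have he0cast : (PySem.List.pyGet? e 0).getD 0 = ((((PySem.List.pyGet? e 0).getD 0).toNat : Nat) : Int) := by
      rw [he0]; omega
    have he0lt : (((PySem.List.pyGet? e 0).getD 0).toNat) < adj.length := by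
      rw [he0]; omega
    have hsub := IH (((PySem.List.pyGet? e 0).getD 0).toNat) he0lt dp hInv
    rw [← he0cast] at hsub
    simp only [List.foldl_cons]
    have hrec := ihl (fun e' he' => hok e' (List.mem_cons_of_mem _ he'))
      (acc ++ [(solveGo adj n m r ((PySem.List.pyGet? e 0).getD 0) ((r : Int)) dp).1
        + (PySem.List.pyGet? e 1).getD 0])
      ((solveGo adj n m r ((PySem.List.pyGet? e 0).getD 0) ((r : Int)) dp).2) hsub.2
    refine ⟨?_, hrec.2⟩
    rw [hrec.1, hsub.1]
    simp

lemma goA_spec (adj : List (List (List Int))) (n m : Int)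
    (hRows : RowsOk adj) (hV : (adj.length : Int) ≤ n * m) :
    ∀ (r : Nat) (v : Nat), v < adj.length → ∀ (dp0 dp : List Int), MemoInv adj dp0 (n * m) dp →
      (solveGo adj n m r (v : Int) (r : Int) dp).1 = specF adj dp0 (n * m) r v ∧
      MemoInv adj dp0 (n * m) (solveGo adj n m r (v : Int) (r : Int) dp).2 := by
  intro r
  induction r with
  | zero =>
    intro v hv dp0 dp hInv
    constructor
    · rw [solveGo]
      simp [specF]
    · rw [solveGo]
      simpa using hInv
  | succ r ih =>
    intro v hv dp0 dp hInv
    have hrem : (((r+1 : Nat)) : Int) ≠ 0 := by push_cast; omega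
    have hK : ((v : Int)) + (((r+1 : Nat)) : Int) * n * m = (v : Int) + ((r : Int) + 1) * (n * m) := by
      push_cast; ring
    have hcast1 : (((r+1 : Nat)) : Int) = (r : Int) + 1 := by push_cast; ring
    have hsub1 : (((r+1 : Nat)) : Int) - 1 = ((r : Int)) := by push_cast; ring
    have hstate := hInv.2 (r+1) v (by omega) hv
    rw [hcast1] at hstate
    have hrow : (PySem.List.pyGet? adj ((v : Nat) : Int)).getD [] = adj.getD v [] := by
      rw [PySem.List.pyGet?_natCast, List.getElem?_eq_getElem (by exact_mod_cast hv),
        List.getD_eq_getElem _ _ (by exact_mod_cast hv)]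
      rfl
    have hrowmem : adj.getD v [] ∈ adj := by
      rw [List.getD_eq_getElem _ _ (by exact_mod_cast hv)]
      exact List.getElem_mem _
    obtain ⟨-, hrowok⟩ := hRows _ hrowmem
    rw [solveGo, if_neg hrem]
    simp only [specF]
    simp only [hK, hsub1, hrow]
    have hfold := goA_fold adj n m dp0 r (fun w hw dp' hI => ih w hw dp0 dp' hI)
      (adj.getD v []) hrowok [] dp hInv
    by_cases hm : (PySem.List.pyGet? dp ((v : Int) + ((r : Int) + 1) * (n * m))).getD 0 = -1
    · -- A recomputes
      have hspec0 : specF adj dp0 (n*m) (r+1) v = specF adj dp0 (n*m) (Nat.succ r) v := rfl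
      rcases hstate with hEq | ⟨hOrig, hWr⟩
      · have hOrig : PySem.List.pyGet? dp0 ((v : Int) + ((r : Int) + 1) * (n * m)) = some (-1) := by
          rw [← hEq]
          cases hget : PySem.List.pyGet? dp ((v : Int) + ((r : Int) + 1) * (n * m)) with
          | none => rw [hget] at hm; simp at hm
          | some w => rw [hget] at hm; simp at hm; rw [hm]
        rw [if_neg (by simp [hm]), if_neg (by rw [hOrig]; simp)]
        simp only [hfold.1, List.nil_append]
        refine ⟨trivial, ?_⟩
        have hw := MemoInv_write adj dp0 (n*m) hV hfold.2 (r+1) v (by omega) hv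
          (by rw [hcast1]; exact hOrig)
        rw [hcast1] at hw
        rw [show specF adj dp0 (n*m) (r+1) v = pyMinList ((adj.getD v []).map (fun e =>
            specF adj dp0 (n*m) r ((PySem.List.pyGet? e 0).getD 0).toNat
              + (PySem.List.pyGet? e 1).getD 0)) from by
          rw [hspec0]
          simp only [specF]
          rw [if_neg (by rw [hOrig]; simp)]] at hw
        exact hw
      · have hmemv : (PySem.List.pyGet? dp ((v : Int) + ((r : Int) + 1) * (n * m))).getD 0
            = specF adj dp0 (n*m) (r+1) v := by rw [hWr]; rfl
        have hspec : specF adj dp0 (n*m) (r+1) v = pyMinList ((adj.getD v []).map (fun e =>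
            specF adj dp0 (n*m) r ((PySem.List.pyGet? e 0).getD 0).toNat
              + (PySem.List.pyGet? e 1).getD 0)) := by
          simp only [specF]
          rw [if_neg (by rw [hOrig]; simp)]
        rw [if_neg (by simp [hm]), if_neg (by rw [hOrig]; simp)]
        simp only [hfold.1, List.nil_append]
        refine ⟨trivial, ?_⟩
        have hw := MemoInv_write adj dp0 (n*m) hV hfold.2 (r+1) v (by omega) hv
          (by rw [hcast1]; exact hOrig)
        rw [hcast1] at hw
        rw [hspec] at hw
        exact hw
    · -- A returns the memoized value
      rw [if_pos (by simp [hm])]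
      rcases hstate with hEq | ⟨hOrig, hWr⟩
      · rw [hEq] at hm ⊢
        rw [if_pos (by simp [hm])]
        exact ⟨rfl, hInv⟩
      · rw [if_neg (by rw [hOrig]; simp)]
        refine ⟨?_, hInv⟩
        have hmemv : (PySem.List.pyGet? dp ((v : Int) + ((r : Int) + 1) * (n * m))).getD 0
            = specF adj dp0 (n*m) (r+1) v := by rw [hWr]; rfl
        rw [hmemv]
        simp only [specF]
        rw [if_neg (by rw [hOrig]; simp)]

lemma alt_levels (adj : List (List (List Int))) (dp : List Int) (nm : Int)
    (hRows : RowsOk adj) :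
    ∀ (k : Nat), (List.range k).foldl
      (fun prev (k' : Nat) =>
        (List.range adj.length).map (fun (v : Nat) =>
          if (PySem.List.pyGet? dp ((v : Int) + ((k' : Int) + 1) * nm)).getD 0 ≠ -1
          then (PySem.List.pyGet? dp ((v : Int) + ((k' : Int) + 1) * nm)).getD 0
          else pyMinList ((adj.getD v []).map (fun e =>
            (PySem.List.pyGet? prev ((PySem.List.pyGet? e 0).getD 0)).getD 0
              + (PySem.List.pyGet? e 1).getD 0))))
      (List.replicate adj.length (0 : Int))
      = (List.range adj.length).map (fun v => specF adj dp nm k v) := by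
  intro k
  induction k with
  | zero =>
    simp [specF, List.map_const']
  | succ k ihk =>
    rw [List.range_succ, List.foldl_append, ihk]
    simp only [List.foldl_cons, List.foldl_nil]
    apply List.map_congr_left
    intro v hvmem
    have hv : v < adj.length := List.mem_range.mp hvmem
    have hrowmem : adj.getD v [] ∈ adj := by
      rw [List.getD_eq_getElem _ _ hv]
      exact List.getElem_mem _
    obtain ⟨-, hrowok⟩ := hRows _ hrowmem
    by_cases hm : (PySem.List.pyGet? dp ((v : Int) + ((k : Int) + 1) * nm)).getD 0 = -1
    · rw [if_neg (by simp [hm])]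
      simp only [specF]
      rw [if_neg (by simp [hm])]
      congr 1
      apply List.map_congr_left
      intro e hemem
      obtain ⟨hlen2, h0le, hlt⟩ := hrowok e hemem
      have hne : e ≠ [] := by intro hcon; subst hcon; simp at hlen2
      have he0 : (PySem.List.pyGet? e 0).getD 0 = e.headD 0 := pyGet0_headD e hne
      have h0le' : 0 ≤ (PySem.List.pyGet? e 0).getD 0 := by rw [he0]; exact h0le
      have hlt' : ((PySem.List.pyGet? e 0).getD 0).toNat < adj.length := by
        rw [he0]; omega
      congr 1
      rw [PySem.List.pyGet?_of_nonneg _ h0le', List.getElem?_map, List.getElem?_range hlt']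
      rfl
    · rw [if_pos (by simp [hm])]
      simp only [specF]
      rw [if_pos (by simp [hm])]

lemma specF_root (adj : List (List (List Int))) (dp : List Int) (nm : Int) (R v : Nat)
    (hR : 1 ≤ R)
    (hmem : (PySem.List.pyGet? dp ((v : Int) + (R : Int) * nm)).getD 0 ≠ -1) :
    specF adj dp nm R v = (PySem.List.pyGet? dp ((v : Int) + (R : Int) * nm)).getD 0 := by
  obtain ⟨k, rfl⟩ : ∃ k, R = k + 1 := ⟨R - 1, by omega⟩
  have hc : (((k+1 : Nat)) : Int) = (k : Int) + 1 := by push_cast; ring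
  rw [hc] at hmem ⊢
  simp only [specF]
  rw [if_pos hmem]

lemma go_memo (adj : List (List (List Int))) (n m : Int) (fuel : Nat)
    (node remain : Int) (dp : List Int) (hrz : remain ≠ 0)
    (hmem : (PySem.List.pyGet? dp (node + remain * n * m)).getD 0 ≠ -1) :
    solveGo adj n m fuel node remain dp
      = ((PySem.List.pyGet? dp (node + remain * n * m)).getD 0, dp) := by
  rw [solveGo, if_neg hrz]
  simp [hmem]

lemma alt_eval (node remain : Int) (adj : List (List (List Int))) (dp : List Int) (n m : Int)
    (hrz : remain ≠ 0) :
    solve_alt node remain adj dp n m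
      = (if (PySem.List.pyGet? dp (node + remain * (n * m))).getD 0 ≠ -1
         then (PySem.List.pyGet? dp (node + remain * (n * m))).getD 0
         else (PySem.List.pyGet?
            ((List.range remain.toNat).foldl
              (fun prev (k' : Nat) =>
                (List.range adj.length).map (fun (v : Nat) =>
                  if (PySem.List.pyGet? dp ((v : Int) + ((k' : Int) + 1) * (n * m))).getD 0 ≠ -1
                  then (PySem.List.pyGet? dp ((v : Int) + ((k' : Int) + 1) * (n * m))).getD 0
                  else pyMinList ((adj.getD v []).map (fun e =>
                    (PySem.List.pyGet? prev ((PySem.List.pyGet? e 0).getD 0)).getD 0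
                      + (PySem.List.pyGet? e 1).getD 0))))
              (List.replicate adj.length (0 : Int))) node).getD 0) := by
  rw [solve_alt, if_neg hrz]

-- ===== VERDICT (by name: the statement is the Claim_ definition above) =====
theorem solve_spec : Claim_equal_solve := by
  intro node remain adj dp n m hDom hPre
  unfold Spec_solve
  rcases hPre with hz | ⟨hrz, hlo, hhi, hne⟩ | ⟨h1, h2, h3, h4, h5, hRows⟩
  · subst hz
    rw [solve, solveGo]
    simp [solve_alt]
  · have hkey : node + remain * n * m = node + remain * (n * m) := by ring
    rw [solve, go_memo adj n m _ node remain dp hrz (by rw [hkey]; exact hne)]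
    rw [alt_eval node remain adj dp n m hrz, if_pos hne]
    rw [hkey]
  · have hrz : remain ≠ 0 := by omega
    have hR : remain = ((remain.toNat : Nat) : Int) := (Int.toNat_of_nonneg (by omega)).symm
    have hN : node = ((node.toNat : Nat) : Int) := (Int.toNat_of_nonneg h2).symm
    have hvlt : node.toNat < adj.length := by
      have hx : ((node.toNat : Nat) : Int) < (adj.length : Int) := by rw [← hN]; exact h3
      exact_mod_cast hx
    have hInv0 : MemoInv adj dp (n * m) dp := by
      unfold MemoInv
      exact ⟨rfl, fun _ _ _ _ => Or.inl rfl⟩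
    have hA := (goA_spec adj n m hRows h4 remain.toNat node.toNat hvlt dp dp hInv0).1
    rw [← hN, ← hR] at hA
    rw [solve, hA]
    rw [alt_eval node remain adj dp n m hrz]
    by_cases hroot : (PySem.List.pyGet? dp (node + remain * (n * m))).getD 0 = -1
    · rw [if_neg (by simp [hroot])]
      have hB := alt_levels adj dp (n * m) hRows remain.toNat
      simp only [hB]
      rw [hN]
      rw [PySem.List.pyGet?_of_nonneg _ (by omega : (0:Int) ≤ ((node.toNat : Nat) : Int))]
      rw [List.getElem?_map, Int.toNat_natCast, List.getElem?_range hvlt]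
      rfl
    · rw [if_pos hroot]
      have hrt : 1 ≤ remain.toNat := by omega
      have := specF_root adj dp (n * m) remain.toNat node.toNat hrt
        (by rw [← hR, ← hN]; exact hroot)
      rw [← hR, ← hN] at this
      exact this
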